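-- pv_equiv track=rewrite | github.com/Caesar-Victor/CaesarRepo | python/EP3/ep3.py | calcula_id
-- ===== SOURCE A (Python) =====
-- def calcula_id(matriz):
--     """ Retorna o valor de identificação de uma matriz computada pelo
--     algoritmo adler32
--
--     A função :func:'calcula_id' computa um identificador para uma matriz
--     usando a seguinte versão adaptada do algoritmo de espalhamento Adler32:
--
--         - A = 1 + matriz[0][0] + matriz[0][1] +...+ matriz[m-1][n-1] MOD 65521,
--             onde m é o número de linhas e n é o número de colunas da matriz
--         - B = (1 + matriz[0][0]) + (1 + matriz[0][0]+matriz[0][1]) + ... +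
--           (1 + matriz[0][0] + matriz[0][1] + ... + matriz[m-1][n-1]) MOD 65521
--         - retorna B * (2**16) + A
--
--
--     :param matriz: Uma matriz de inteiros
--     :type matriz: <class 'list'>
--     :return identificador: O identificador inteiro da matriz computado segundo
--         a nossa versão adaptada do Adler32
--     :rtype: <class 'int'>
--
--     :Examples:
--
--     >>> matriz_A = [[0,1,2], [3,4,5]]
--     >>> matriz_B = [[3,4,5], [0,1,2]]
--     >>> matriz_C = [[0,1], [1,0]]
--     >>> matriz_D = [[1,0,2], [3,4,5]]
--     >>> calcula_id(matriz_A)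
--     2686992
--     >>> calcula_id(matriz_B)
--     4456464
--     >>> calcula_id(matriz_C)
--     589827
--     >>> calcula_id(matriz_D)
--     2752528
--
--     .. seealso::
--         Consulte o enunciado para um exemplo mais detalhado.
--     """
--     A = 1
--     B = 0
--     for l in range(len(matriz)):
--         for c in range(len(matriz[0])):
--             A = A+matriz[l][c]
--             B = B+A
--     return ((B % 65521) * (2**16) + (A % 65521))
-- ===== SOURCE B (Python) =====
-- def calcula_id(matriz):
--     m = len(matriz)
--     n = len(matriz[0]) if m else 0
--     N = m * n
--     S = 0
--     W = 0
--     i = 0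
--     for l in range(m):
--         row = matriz[l]
--         for c in range(n):
--             x = row[c]
--             i += 1
--             S += x
--             W += (N - i + 1) * x
--     return ((N + W) % 65521) * (2 ** 16) + (1 + S) % 65521
-- ===== Notes on version B (the rewrite author's own statement) =====
-- stated objective: alternative
-- what changed: B replaces A's running-checksum recurrence (B accumulates the running A at every step) by independent per-element contributions: one pass accumulates the plain sum S and a weighted sum W with weight N-i+1 for the i-th element, then combines A=1+S and B=N+W at the end.
import Mathlib
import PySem

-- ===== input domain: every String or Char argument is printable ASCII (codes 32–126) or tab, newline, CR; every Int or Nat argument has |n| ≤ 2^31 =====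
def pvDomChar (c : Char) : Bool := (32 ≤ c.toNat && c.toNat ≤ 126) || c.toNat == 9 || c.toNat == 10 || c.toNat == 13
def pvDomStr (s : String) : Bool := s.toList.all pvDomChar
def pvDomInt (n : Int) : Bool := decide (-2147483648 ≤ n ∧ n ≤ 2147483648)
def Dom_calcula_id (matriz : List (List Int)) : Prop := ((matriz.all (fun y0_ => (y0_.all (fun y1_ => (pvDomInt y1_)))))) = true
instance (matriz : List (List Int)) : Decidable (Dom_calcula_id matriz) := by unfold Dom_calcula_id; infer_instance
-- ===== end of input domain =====

-- B replaces A's running-checksum recurrence by independent per-element weighted contributions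
-- combined only at the end (objective: alternative decomposition, same cost).

-- ===== PORT A =====
def calcula_id (matriz : List (List Int)) : Int :=
  let st :=
    (PySem.List.pyRange 0 (PySem.List.len matriz)).foldl
      (fun (ab : Int × Int) l =>
        (PySem.List.pyRange 0 (PySem.List.len (PySem.List.pyGetD matriz 0 []))).foldl
          (fun (ab : Int × Int) c =>
            let a := ab.1 + PySem.List.pyGetD (PySem.List.pyGetD matriz l []) c 0
            (a, ab.2 + a))
          ab)
      ((1 : Int), (0 : Int))
  (PySem.Int.mod st.2 65521) * 2 ^ 16 + PySem.Int.mod st.1 65521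

-- ===== PORT B =====
def calcula_id_alt (matriz : List (List Int)) : Int :=
  let m : Int := PySem.List.len matriz
  let n : Int := if m ≠ 0 then PySem.List.len (PySem.List.pyGetD matriz 0 []) else 0
  let N : Int := m * n
  let st :=
    (PySem.List.pyRange 0 m).foldl
      (fun (swi : Int × Int × Int) l =>
        let row := PySem.List.pyGetD matriz l []
        (PySem.List.pyRange 0 n).foldl
          (fun (swi : Int × Int × Int) c =>
            let x := PySem.List.pyGetD row c 0
            let i := swi.2.2 + 1
            (swi.1 + x, swi.2.1 + (N - i + 1) * x, i))
          swi)
      ((0 : Int), (0 : Int), (0 : Int))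
  (PySem.Int.mod (N + st.2.1) 65521) * 2 ^ 16 + PySem.Int.mod (1 + st.1) 65521

-- ===== PRECONDITION & SPEC =====
-- Pre_ excludes exactly the ragged matrices on which the Python A raises IndexError
-- (some row shorter than row 0, whose length A uses as the column count for every row).
def Pre_calcula_id (matriz : List (List Int)) : Prop :=
  ∀ row ∈ matriz, (matriz.headD []).length ≤ row.length
instance (matriz : List (List Int)) : Decidable (Pre_calcula_id matriz) := by
  unfold Pre_calcula_id; infer_instance
def pvWitness_calcula_id : List (List Int) := [[0, 1, 2], [3, 4, 5]]

def Spec_calcula_id (matriz : List (List Int)) (out : Int) : Prop := out = calcula_id_alt matriz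
instance (matriz : List (List Int)) (out : Int) : Decidable (Spec_calcula_id matriz out) := by unfold Spec_calcula_id; infer_instance

-- ===== CLAIM (what is proved, stated in full; the proofs are below) =====
def Claim_equal_calcula_id : Prop := ∀ (matriz : List (List Int)), Dom_calcula_id matriz → Pre_calcula_id matriz → Spec_calcula_id matriz (calcula_id matriz)

-- ===== LEMMAS AND PROOFS =====

-- A's step: running checksum pair (A, B).
def pvStepA (ab : Int × Int) (x : Int) : Int × Int :=
  (ab.1 + x, ab.2 + (ab.1 + x))

-- B's step, parametrised by the total element count N: (S, W, i).
def pvStepB (N : Int) (swi : Int × Int × Int) (x : Int) : Int × Int × Int :=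
  (swi.1 + x, swi.2.1 + (N - (swi.2.2 + 1) + 1) * x, swi.2.2 + 1)

-- The row as A/B actually read it: n defaulted lookups, in order.
def pvRead (n : Nat) (row : List Int) : List Int :=
  (List.range n).map (fun k => row.getD k 0)

theorem pvRead_length (n : Nat) (row : List Int) : (pvRead n row).length = n := by
  simp [pvRead]

-- Coupling invariant between the two folds over the same element list.
theorem pvCouple (N : Int) (xs : List Int) :
    ∀ (s w i : Int),
      (xs.foldl pvStepA (1 + s, i + w - (N - i) * s)).1
          = 1 + (xs.foldl (pvStepB N) (s, w, i)).1 ∧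
      (xs.foldl pvStepA (1 + s, i + w - (N - i) * s)).2
          = (xs.foldl (pvStepB N) (s, w, i)).2.2
              + (xs.foldl (pvStepB N) (s, w, i)).2.1
              - (N - (xs.foldl (pvStepB N) (s, w, i)).2.2)
                  * (xs.foldl (pvStepB N) (s, w, i)).1 ∧
      (xs.foldl (pvStepB N) (s, w, i)).2.2 = i + xs.length := by
  induction xs with
  | nil => intro s w i; simp
  | cons x t ih =>
    intro s w i
    have h1 : pvStepA (1 + s, i + w - (N - i) * s) x
        = (1 + (s + x), (i + 1) + (w + (N - (i + 1) + 1) * x)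
            - (N - (i + 1)) * (s + x)) := by
      simp only [pvStepA, Prod.mk.injEq]; constructor <;> ring
    have h2 : pvStepB N (s, w, i) x = (s + x, w + (N - (i + 1) + 1) * x, i + 1) := rfl
    simp only [List.foldl_cons, h1, h2]
    obtain ⟨a1, a2, a3⟩ := ih (s + x) (w + (N - (i + 1) + 1) * x) (i + 1)
    refine ⟨a1, a2, by rw [a3]; simp; ring⟩

-- Inner fold over pyRange-with-pyGetD = fold over the read-out row.
theorem pvInner {σ : Type} (f : σ → Int → σ) (st : σ) (n : Nat) (row : List Int) :
    (PySem.List.pyRange 0 (n : Int)).foldl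
        (fun st c => f st (PySem.List.pyGetD row c 0)) st
      = (pvRead n row).foldl f st := by
  rw [PySem.List.pyRange_zero_natCast, List.foldl_map, pvRead, List.foldl_map]
  simp [PySem.List.pyGetD_natCast]

-- A's whole double loop, flattened.
theorem pvFlatA (matriz : List (List Int)) (n : Nat) :
    (PySem.List.pyRange 0 (PySem.List.len matriz)).foldl
      (fun (ab : Int × Int) l =>
        (PySem.List.pyRange 0 (n : Int)).foldl
          (fun (ab : Int × Int) c =>
            (ab.1 + PySem.List.pyGetD (PySem.List.pyGetD matriz l []) c 0,
             ab.2 + (ab.1 + PySem.List.pyGetD (PySem.List.pyGetD matriz l []) c 0)))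
          ab)
      ((1 : Int), (0 : Int))
    = (matriz.flatMap (pvRead n)).foldl pvStepA (1, 0) := by
  rw [PySem.List.foldl_pyRange_pyGetD matriz []
    (fun (ab : Int × Int) row =>
      (PySem.List.pyRange 0 (n : Int)).foldl
        (fun (ab : Int × Int) c =>
          (ab.1 + PySem.List.pyGetD row c 0,
           ab.2 + (ab.1 + PySem.List.pyGetD row c 0))) ab)
    ((1 : Int), (0 : Int)) (le_refl 0)]
  rw [List.foldl_flatMap]
  simp only [Int.toNat_zero, List.drop_zero]
  congr 1
  funext ab row
  rw [← pvInner pvStepA ab n row]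
  rfl

-- B's whole double loop, flattened.
theorem pvFlatB (matriz : List (List Int)) (n : Nat) (N : Int) :
    (PySem.List.pyRange 0 (PySem.List.len matriz)).foldl
      (fun (swi : Int × Int × Int) l =>
        (PySem.List.pyRange 0 (n : Int)).foldl
          (fun (swi : Int × Int × Int) c =>
            (swi.1 + PySem.List.pyGetD (PySem.List.pyGetD matriz l []) c 0,
             swi.2.1 + (N - (swi.2.2 + 1) + 1)
                 * PySem.List.pyGetD (PySem.List.pyGetD matriz l []) c 0,
             swi.2.2 + 1))
          swi)
      ((0 : Int), (0 : Int), (0 : Int))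
    = (matriz.flatMap (pvRead n)).foldl (pvStepB N) (0, 0, 0) := by
  rw [PySem.List.foldl_pyRange_pyGetD matriz []
    (fun (swi : Int × Int × Int) row =>
      (PySem.List.pyRange 0 (n : Int)).foldl
        (fun (swi : Int × Int × Int) c =>
          (swi.1 + PySem.List.pyGetD row c 0,
           swi.2.1 + (N - (swi.2.2 + 1) + 1) * PySem.List.pyGetD row c 0,
           swi.2.2 + 1)) swi)
    ((0 : Int), (0 : Int), (0 : Int)) (le_refl 0)]
  rw [List.foldl_flatMap]
  simp only [Int.toNat_zero, List.drop_zero]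
  congr 1
  funext swi row
  rw [← pvInner (pvStepB N) swi n row]
  rfl

theorem pvFlat_length (matriz : List (List Int)) (n : Nat) :
    (matriz.flatMap (pvRead n)).length = matriz.length * n := by
  induction matriz with
  | nil => simp
  | cons r t ih => simp [List.flatMap_cons, pvRead_length, ih]; ring

-- ===== VERDICT (by name: the statement is the Claim_ definition above) =====
theorem calcula_id_spec : Claim_equal_calcula_id := by
  intro matriz _ _
  unfold Spec_calcula_id calcula_id calcula_id_alt
  set n : Nat := (PySem.List.pyGetD matriz 0 []).length with hn
  have hnif : (if (PySem.List.len matriz : Int) ≠ 0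
      then PySem.List.len (PySem.List.pyGetD matriz 0 []) else 0) = (n : Int) := by
    by_cases h : matriz = []
    · subst h; simp [PySem.List.len, PySem.List.pyGetD, hn]
    · rw [if_pos]
      · rfl
      · simp [PySem.List.len]
        exact h
  simp only [PySem.List.len] at *
  rw [hnif]
  have hN : (matriz.length : Int) * (n : Int)
      = ((matriz.flatMap (pvRead n)).length : Int) := by
    rw [pvFlat_length]; push_cast; ring
  rw [hN]
  set xs := matriz.flatMap (pvRead n) with hxs
  set N : Int := (xs.length : Int) with hNdef
  have hA := pvFlatA matriz n
  have hB := pvFlatB matriz n N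
  simp only [PySem.List.len] at hA hB
  rw [hA, hB]
  have hc := pvCouple N xs 0 0 0
  simp only [add_zero, zero_add, mul_zero, sub_zero] at hc
  obtain ⟨c1, c2, c3⟩ := hc
  set q := xs.foldl (pvStepB N) ((0 : Int), (0 : Int), (0 : Int)) with hq
  have c3' : q.2.2 = N := by rw [c3, hNdef]
  rw [c1, c2, c3']
  have harith : N + q.2.1 - (N - N) * q.1 = N + q.2.1 := by ring
  rw [harith]
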